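-- pv_equiv track=rewrite | github.com/gto76/wfdl | parse.py | get_radii
-- ===== SOURCE A (Python) =====
-- def get_radii(elements):
--     out = []
--     r = 100
--     offsets = [a[0] for a in elements]
--     for offset in offsets:
--         r -= offset
--         out.append(r)
--     return out
-- ===== SOURCE B (Python) =====
-- def get_radii(elements):
--     # start from the innermost (final) radius and walk backwards,
--     # adding each offset back; output is built back-to-front.
--     r = 100 - sum(e[0] for e in elements)
--     out = []
--     for e in reversed(elements):
--         out.append(r)
--         r += e[0]
--     out.reverse()
--     return out
-- ===== Notes on version B (the rewrite author's own statement) =====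
-- stated objective: alternative
-- what changed: A walks the list forward subtracting each offset from a running radius; B computes the total offset sum once, starts from the final radius 100 - total, traverses the list in reverse adding offsets back, and builds the output back-to-front.
import Mathlib
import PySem

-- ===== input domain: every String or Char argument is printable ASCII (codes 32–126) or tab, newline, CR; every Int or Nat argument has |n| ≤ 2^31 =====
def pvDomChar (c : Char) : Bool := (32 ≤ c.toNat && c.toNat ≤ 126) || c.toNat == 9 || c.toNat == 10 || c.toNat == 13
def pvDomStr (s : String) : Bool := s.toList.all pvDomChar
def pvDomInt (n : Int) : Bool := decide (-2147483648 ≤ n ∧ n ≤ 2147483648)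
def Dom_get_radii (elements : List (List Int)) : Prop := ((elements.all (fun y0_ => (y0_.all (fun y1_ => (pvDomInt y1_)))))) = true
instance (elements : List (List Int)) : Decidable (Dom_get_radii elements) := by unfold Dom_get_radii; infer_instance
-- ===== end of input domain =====

-- B replaces A's forward running-subtraction loop by a reverse traversal: compute the
-- total offset sum, start from the final radius, and rebuild the radii back-to-front
-- by adding offsets back (objective: alternative).


-- ===== PORT A =====
-- a[0] raises IndexError on an empty inner list; Pre_ excludes that, .getD 0 is a dummy there.
def get_radii (elements : List (List Int)) : List Int :=
  let offsets := elements.map (fun a => (PySem.List.pyGet? a 0).getD 0)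
  (offsets.foldl (fun (st : List Int × Int) offset =>
      let r := st.2 - offset
      (st.1 ++ [r], r)) ([], 100)).1

-- ===== PORT B =====
-- e[0] raises IndexError on an empty inner list; Pre_ excludes that, .getD 0 is a dummy there.
def get_radii_alt (elements : List (List Int)) : List Int :=
  let r0 : Int := 100 - elements.foldl (fun s e => s + (PySem.List.pyGet? e 0).getD 0) 0
  let st := elements.reverse.foldl (fun (st : List Int × Int) e =>
      (st.1 ++ [st.2], st.2 + (PySem.List.pyGet? e 0).getD 0)) ([], r0)
  st.1.reverse

-- ===== PRECONDITION & SPEC =====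
-- Pre_ excludes inputs with an empty inner list, on which Python A (and B) raise IndexError.
def Pre_get_radii (elements : List (List Int)) : Prop := ∀ e ∈ elements, e ≠ []
instance (elements : List (List Int)) : Decidable (Pre_get_radii elements) := by unfold Pre_get_radii; infer_instance
def pvWitness_get_radii : List (List Int) := [[30, 1], [20], [5]]
def Spec_get_radii (elements : List (List Int)) (out : List Int) : Prop := out = get_radii_alt elements
instance (elements : List (List Int)) (out : List Int) : Decidable (Spec_get_radii elements out) := by unfold Spec_get_radii; infer_instance

-- ===== CLAIM (what is proved, stated in full; the proofs are below) =====
def Claim_equal_get_radii : Prop := ∀ (elements : List (List Int)), Dom_get_radii elements → Pre_get_radii elements → Spec_get_radii elements (get_radii elements)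

-- ===== LEMMAS AND PROOFS =====
-- first offset of an inner list
def pvG (e : List Int) : Int := (PySem.List.pyGet? e 0).getD 0

-- reference recursion: the radii list starting from radius r
def pvRad (xs : List (List Int)) (r : Int) : List Int :=
  match xs with
  | [] => []
  | x :: rest => (r - pvG x) :: pvRad rest (r - pvG x)

def pvSum (xs : List (List Int)) : Int := (xs.map pvG).sum

theorem pvRad_out : ∀ (xs : List (List Int)) (acc : List Int) (r : Int),
    ((xs.map pvG).foldl (fun (st : List Int × Int) offset =>
        (st.1 ++ [st.2 - offset], st.2 - offset)) (acc, r)).1 = acc ++ pvRad xs r := by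
  intro xs
  induction xs with
  | nil => intro acc r; simp [pvRad]
  | cons x rest ih =>
    intro acc r
    simp only [List.map_cons, List.foldl_cons, pvRad]
    rw [ih]
    simp

theorem pvSumFold : ∀ (xs : List (List Int)) (s : Int),
    xs.foldl (fun s e => s + pvG e) s = s + pvSum xs := by
  intro xs
  induction xs with
  | nil => intro s; simp [pvSum]
  | cons x rest ih =>
    intro s
    simp only [List.foldl_cons]
    rw [ih]
    simp [pvSum]
    ring

theorem pvB_loop : ∀ (xs : List (List Int)) (r0 : Int),
    (xs.foldr (fun e (st : List Int × Int) =>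
        (st.1 ++ [st.2], st.2 + pvG e)) ([], r0))
    = ((pvRad xs (r0 + pvSum xs)).reverse, r0 + pvSum xs) := by
  intro xs
  induction xs with
  | nil => intro r0; simp [pvRad, pvSum]
  | cons x rest ih =>
    intro r0
    have hs : pvSum (x :: rest) = pvSum rest + pvG x := by
      simp [pvSum]; ring
    have hc : r0 + pvSum (x :: rest) - pvG x = r0 + pvSum rest := by rw [hs]; ring
    simp only [List.foldr_cons, ih]
    rw [Prod.mk.injEq]
    refine ⟨?_, by rw [hs]; ring⟩
    simp only [pvRad, hc, List.reverse_cons]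

theorem get_radii_eq (elements : List (List Int)) :
    get_radii elements = pvRad elements 100 := by
  unfold get_radii
  have := pvRad_out elements [] 100
  simpa [pvG] using this

theorem get_radii_alt_eq (elements : List (List Int)) :
    get_radii_alt elements = pvRad elements 100 := by
  have hs : elements.foldl (fun s e => s + (PySem.List.pyGet? e 0).getD 0) 0 = pvSum elements := by
    simpa [pvG] using pvSumFold elements 0
  have hb := pvB_loop elements (100 - pvSum elements)
  simp only [pvG] at hb
  have h100 : 100 - pvSum elements + pvSum elements = 100 := by ring
  rw [h100] at hb
  simp only [get_radii_alt, List.foldl_reverse, hs, hb, List.reverse_reverse]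

-- ===== VERDICT (by name: the statement is the Claim_ definition above) =====
theorem get_radii_spec : Claim_equal_get_radii := by
  intro elements _ _
  unfold Spec_get_radii
  rw [get_radii_eq, get_radii_alt_eq]
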